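-- pv_equiv track=rewrite | github.com/FzS92/ChatAdvisor | chat_advisor/app.py | replace_comma_before_newline
-- ===== SOURCE A (Python) =====
-- def replace_comma_before_newline(input_text: str) -> str:
--     """Replaces a comma before a newline with a colon."""
--     lines = input_text.split("\n")
--     processed_lines = ""
--
--     for line in lines:
--         if line.endswith(","):
--             line = line[:-1] + ": "
--         elif line.endswith(", "):
--             line = line[:-2] + ": "
--         else:
--             line = line + "\n"
--         processed_lines += line
--     return processed_lines
-- ===== SOURCE B (Python) =====
-- def _colonize(out):
--     """If out ends a line with ',' or ', ', return out with that turned into ': '; else None."""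
--     if out[-1:] == [","]:
--         return out[:-1] + [":", " "]
--     if out[-2:] == [",", " "]:
--         return out[:-2] + [":", " "]
--     return None
--
--
-- def replace_comma_before_newline(input_text: str) -> str:
--     out = []
--     for ch in input_text:
--         if ch == "\n":
--             fixed = _colonize(out)
--             out = fixed if fixed is not None else out + ["\n"]
--         else:
--             out.append(ch)
--     fixed = _colonize(out)
--     out = fixed if fixed is not None else out + ["\n"]
--     return "".join(out)
-- ===== Notes on version B (the rewrite author's own statement) =====
-- stated objective: alternative
-- what changed: Replaced split-on-newline plus a per-line endswith/slice rewrite with string concatenation by a single character-level scan that appends characters to a buffer and, at each newline (and once at the end), patches a trailing comma or comma-space in the buffer into colon-space.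
import Mathlib
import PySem

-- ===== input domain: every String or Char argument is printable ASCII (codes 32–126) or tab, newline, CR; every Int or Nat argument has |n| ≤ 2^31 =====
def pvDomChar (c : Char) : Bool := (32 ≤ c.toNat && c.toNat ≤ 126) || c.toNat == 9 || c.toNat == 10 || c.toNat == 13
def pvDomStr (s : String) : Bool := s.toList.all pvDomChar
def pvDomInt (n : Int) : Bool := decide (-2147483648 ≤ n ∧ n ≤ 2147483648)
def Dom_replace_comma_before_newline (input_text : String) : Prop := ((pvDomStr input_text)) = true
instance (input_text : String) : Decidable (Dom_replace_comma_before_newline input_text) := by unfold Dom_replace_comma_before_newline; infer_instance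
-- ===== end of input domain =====

-- B replaces A's split-into-lines + per-line endswith/slice rewrite by a single character scan
-- that patches a trailing comma or comma-space of the emitted buffer at each newline (objective: alternative).

-- ===== PORT A =====
-- per-line body of A's for-loop: a ',' / ', ' ending becomes ': ', otherwise the newline is restored
def pvLineFix (line : List Char) : List Char :=
  if PySem.Chars.endswith line [','] then
    PySem.Chars.slice line none (some (-1)) ++ [':', ' ']
  else if PySem.Chars.endswith line [',', ' '] then
    PySem.Chars.slice line none (some (-2)) ++ [':', ' ']
  else line ++ ['\n']

def replace_comma_before_newline (input_text : String) : String :=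
  let lines := PySem.Chars.splitOn input_text.toList ['\n']
  String.ofList (lines.foldl (fun processed line => processed ++ pvLineFix line) [])

-- ===== PORT B =====
-- _colonize of Source B: out[-1:] == [','] / out[-2:] == [',', ' '] → trailing comma becomes ': '
def pvColonize (out : List Char) : Option (List Char) :=
  if PySem.List.slice out (some (-1)) none = [','] then
    some (PySem.List.slice out none (some (-1)) ++ [':', ' '])
  else if PySem.List.slice out (some (-2)) none = [',', ' '] then
    some (PySem.List.slice out none (some (-2)) ++ [':', ' '])
  else none

-- 'out = fixed if fixed is not None else out + ["\n"]' (used at each newline and once at the end)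
def pvFinal (out : List Char) : List Char :=
  match pvColonize out with
  | some fixed => fixed
  | none => out ++ ['\n']

def pvStep (out : List Char) (ch : Char) : List Char :=
  if ch = '\n' then pvFinal out else out ++ [ch]

def replace_comma_before_newline_alt (input_text : String) : String :=
  String.ofList (pvFinal (input_text.toList.foldl pvStep []))

-- ===== PRECONDITION & SPEC =====
def Spec_replace_comma_before_newline (input_text : String) (out : String) : Prop := out = replace_comma_before_newline_alt input_text
instance (input_text : String) (out : String) : Decidable (Spec_replace_comma_before_newline input_text out) := by unfold Spec_replace_comma_before_newline; infer_instance

-- ===== CLAIM (what is proved, stated in full; the proofs are below) =====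
def Claim_equal_replace_comma_before_newline : Prop := ∀ (input_text : String), Dom_replace_comma_before_newline input_text → Spec_replace_comma_before_newline input_text (replace_comma_before_newline input_text)

-- ===== LEMMAS AND PROOFS =====

-- reference splitter: Python's s.split("\n") as a structural recursion
def pvSplit (pre : List Char) : List Char → List (List Char)
  | [] => [pre]
  | c :: rest => if c = '\n' then pre :: pvSplit [] rest else pvSplit (pre ++ [c]) rest

theorem pvGo_eq : ∀ (fuel : Nat) (l cur : List Char) (acc : List (List Char)), l.length ≤ fuel →
    PySem.Chars.splitOn.go ['\n'] fuel l cur acc = acc.reverse ++ pvSplit cur.reverse l := by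
  intro fuel
  induction fuel with
  | zero =>
    intro l cur acc h
    have hl : l = [] := List.eq_nil_of_length_eq_zero (Nat.le_zero.mp h)
    subst hl
    rw [PySem.Chars.splitOn.go.eq_def]
    simp [pvSplit]
  | succ n ih =>
    intro l cur acc h
    cases l with
    | nil =>
      rw [PySem.Chars.splitOn.go.eq_def]
      simp [pvSplit]
    | cons c rest =>
      rw [PySem.Chars.splitOn.go.eq_def]
      by_cases hc : c = '\n'
      · subst hc
        simp only [List.isPrefixOf_iff_prefix]
        rw [if_pos (by simp)]
        rw [ih _ _ _ (by simpa using Nat.le_of_succ_le_succ h)]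
        simp [pvSplit]
      · simp only [List.isPrefixOf_iff_prefix]
        rw [if_neg (by simp [List.prefix_cons_iff, Ne.symm hc])]
        rw [ih _ _ _ (by simpa using Nat.le_of_succ_le_succ h)]
        simp [pvSplit, hc]

theorem pvSplitOn_eq (s : List Char) : PySem.Chars.splitOn s ['\n'] = pvSplit [] s := by
  rw [PySem.Chars.splitOn]
  rw [pvGo_eq _ _ _ _ (by omega)]
  simp


theorem pvColonize_comma (l : List Char) : pvColonize (l ++ [',']) = some (l ++ [':', ' ']) := by
  unfold pvColonize
  rw [PySem.List.slice_from_neg_one, PySem.List.slice_to_neg_one,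
    show (l ++ [',']).length - 1 = l.length by simp, List.drop_left, if_pos rfl,
    List.dropLast_concat]

theorem pvColonize_comma_space (l : List Char) :
    pvColonize (l ++ [',', ' ']) = some (l ++ [':', ' ']) := by
  unfold pvColonize
  rw [show l ++ [',', ' '] = (l ++ [',']) ++ [' '] by simp,
    PySem.List.slice_from_neg_one,
    show ((l ++ [',']) ++ [' ']).length - 1 = (l ++ [',']).length by simp, List.drop_left,
    if_neg (by decide),
    PySem.List.slice_from_neg_ofNat _ 2 (by omega), PySem.List.slice_to_neg_ofNat _ 2 (by omega),
    show ((l ++ [',']) ++ [' ']).length - 2 = l.length by simp,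
    show (l ++ [',']) ++ [' '] = l ++ [',', ' '] by simp,
    List.drop_left, List.take_left, if_pos rfl]

theorem pvColonize_concat_none (l : List Char) (c : Char) (hc : c ≠ ',')
    (h2 : ¬ (c = ' ' ∧ l.getLast? = some ',')) : pvColonize (l ++ [c]) = none := by
  unfold pvColonize
  rw [PySem.List.slice_from_neg_one,
    show (l ++ [c]).length - 1 = l.length by simp, List.drop_left,
    if_neg (by simpa using fun h => hc h),
    PySem.List.slice_from_neg_ofNat _ 2 (by omega)]
  rcases l.eq_nil_or_concat with rfl | ⟨q, d, rfl⟩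
  · rw [if_neg (by intro hEq; have := congrArg List.length hEq; simp at this)]
  · simp only [List.concat_eq_append] at h2 ⊢
    rw [show (q ++ [d]) ++ [c] = q ++ [d, c] by simp,
      show (q ++ [d, c]).length - 2 = q.length by simp, List.drop_left,
      if_neg ?_]
    intro hEq
    have hd : d = ',' := by simpa using congrArg (fun t => t.headD ' ') hEq
    have hcc : c = ' ' := by simpa using congrArg (fun t => t.getLast?) hEq
    exact h2 ⟨hcc, by rw [List.getLast?_concat]; simp [hd]⟩

theorem pvColonize_nil : pvColonize [] = none := by decide

theorem pvColonize_none_getLast {acc : List Char} (h : pvColonize acc = none) :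
    acc.getLast? ≠ some ',' := by
  intro hl
  rcases acc.eq_nil_or_concat with rfl | ⟨q, d, rfl⟩
  · simp at hl
  · simp only [List.concat_eq_append, List.getLast?_concat] at hl h
    obtain rfl : d = ',' := by simpa using hl
    rw [pvColonize_comma] at h
    simp at h

theorem pvSuffix_singleton {a b : Char} {l : List Char} : [a] <:+ l ++ [b] ↔ a = b := by
  constructor
  · rintro ⟨t, ht⟩
    have := congrArg List.getLast? ht
    simpa using this
  · rintro rfl
    exact ⟨l, rfl⟩

theorem pvSuffix_pair {a b c : Char} {l : List Char} (h : [a, b] <:+ l ++ [c]) :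
    b = c ∧ l.getLast? = some a := by
  obtain ⟨t, ht⟩ := h
  have hbc := congrArg List.getLast? ht
  rw [show t ++ [a, b] = (t ++ [a]) ++ [b] by simp] at ht hbc
  simp only [List.getLast?_concat] at hbc
  have hdl := congrArg List.dropLast ht
  rw [List.dropLast_concat, List.dropLast_concat] at hdl
  constructor
  · simpa using hbc
  · rw [← hdl, List.getLast?_concat]


theorem pvLineFix_nil : pvLineFix [] = ['\n'] := by decide

theorem pvLineFix_comma (q : List Char) : pvLineFix (q ++ [',']) = q ++ [':', ' '] := by
  unfold pvLineFix
  rw [if_pos (by rw [PySem.Chars.endswith, List.isSuffixOf_iff_suffix]; exact pvSuffix_singleton.mpr rfl),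
    PySem.Chars.slice_eq_listSlice, PySem.List.slice_to_neg_one, List.dropLast_concat]

theorem pvLineFix_comma_space (q : List Char) :
    pvLineFix (q ++ [',', ' ']) = q ++ [':', ' '] := by
  unfold pvLineFix
  rw [show q ++ [',', ' '] = (q ++ [',']) ++ [' '] by simp,
    if_neg (by rw [PySem.Chars.endswith, List.isSuffixOf_iff_suffix]; intro h; exact absurd (pvSuffix_singleton.mp h) (by decide)),
    if_pos (by rw [PySem.Chars.endswith, List.isSuffixOf_iff_suffix]; exact ⟨q, by simp⟩),
    PySem.Chars.slice_eq_listSlice, PySem.List.slice_to_neg_ofNat _ 2 (by omega),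
    show ((q ++ [',']) ++ [' ']).length - 2 = q.length by simp,
    show (q ++ [',']) ++ [' '] = q ++ [',', ' '] by simp, List.take_left]

theorem pvLineFix_other (q : List Char) (c : Char) (hc : c ≠ ',')
    (h2 : ¬ (c = ' ' ∧ q.getLast? = some ',')) : pvLineFix (q ++ [c]) = q ++ [c] ++ ['\n'] := by
  unfold pvLineFix
  rw [if_neg (by rw [PySem.Chars.endswith, List.isSuffixOf_iff_suffix]; intro h; exact hc (pvSuffix_singleton.mp h).symm),
    if_neg (by
      rw [PySem.Chars.endswith, List.isSuffixOf_iff_suffix]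
      intro hsuf
      obtain ⟨hce, hq⟩ := pvSuffix_pair hsuf
      exact h2 ⟨hce.symm, hq⟩)]

-- the key per-line correspondence: finishing the buffer acc ++ pre behaves as A's line rewrite
theorem pvFinal_append (acc pre : List Char) (hacc : pvColonize acc = none) :
    pvFinal (acc ++ pre) = acc ++ pvLineFix pre := by
  rcases pre.eq_nil_or_concat with rfl | ⟨q, c, rfl⟩
  · rw [pvLineFix_nil]
    unfold pvFinal
    rw [List.append_nil, hacc]
  · simp only [List.concat_eq_append]
    by_cases hc : c = ','
    · subst hc
      rw [show acc ++ (q ++ [',']) = (acc ++ q) ++ [','] by simp]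
      unfold pvFinal
      rw [pvColonize_comma, pvLineFix_comma]
      simp
    · by_cases h2 : c = ' ' ∧ q.getLast? = some ','
      · obtain ⟨rfl, hq⟩ := h2
        rcases q.eq_nil_or_concat with rfl | ⟨q', d, rfl⟩
        · simp at hq
        · simp only [List.concat_eq_append, List.getLast?_concat] at hq
          obtain rfl : d = ',' := by simpa using hq
          simp only [List.concat_eq_append]
          rw [show acc ++ (q' ++ [','] ++ [' ']) = (acc ++ q') ++ [',', ' '] by simp]
          unfold pvFinal
          rw [pvColonize_comma_space,
            show q' ++ [','] ++ [' '] = q' ++ [',', ' '] by simp, pvLineFix_comma_space]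
          simp
      · have hout : pvColonize (acc ++ (q ++ [c])) = none := by
          rw [show acc ++ (q ++ [c]) = (acc ++ q) ++ [c] by simp]
          apply pvColonize_concat_none _ _ hc
          rintro ⟨hsp, hlast⟩
          rcases q.eq_nil_or_concat with rfl | ⟨q', d, rfl⟩
          · rw [List.append_nil] at hlast
            exact pvColonize_none_getLast hacc hlast
          · simp only [List.concat_eq_append] at hlast h2
            rw [show acc ++ (q' ++ [d]) = (acc ++ q') ++ [d] by simp, List.getLast?_concat] at hlast
            exact h2 ⟨hsp, by rw [List.getLast?_concat]; exact hlast⟩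
        unfold pvFinal
        rw [hout, pvLineFix_other q c hc h2]
        simp

-- after a finished line the buffer is safe again
theorem pvColonize_lineFix_none (acc pre : List Char) :
    pvColonize (acc ++ pvLineFix pre) = none := by
  rcases pre.eq_nil_or_concat with rfl | ⟨q, c, rfl⟩
  · rw [pvLineFix_nil]
    exact pvColonize_concat_none acc '\n' (by decide) (by simp)
  · simp only [List.concat_eq_append]
    by_cases hc : c = ','
    · subst hc
      rw [pvLineFix_comma, show acc ++ (q ++ [':', ' ']) = (acc ++ (q ++ [':'])) ++ [' '] by simp]
      exact pvColonize_concat_none _ ' ' (by decide)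
        (by rw [show acc ++ (q ++ [':']) = (acc ++ q) ++ [':'] by simp, List.getLast?_concat]; simp)
    · by_cases h2 : c = ' ' ∧ q.getLast? = some ','
      · obtain ⟨rfl, hq⟩ := h2
        rcases q.eq_nil_or_concat with rfl | ⟨q', d, rfl⟩
        · simp at hq
        · simp only [List.concat_eq_append, List.getLast?_concat] at hq
          obtain rfl : d = ',' := by simpa using hq
          simp only [List.concat_eq_append]
          rw [show q' ++ [','] ++ [' '] = q' ++ [',', ' '] by simp, pvLineFix_comma_space,
            show acc ++ (q' ++ [':', ' ']) = (acc ++ (q' ++ [':'])) ++ [' '] by simp]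
          exact pvColonize_concat_none _ ' ' (by decide)
            (by rw [show acc ++ (q' ++ [':']) = (acc ++ q') ++ [':'] by simp, List.getLast?_concat]; simp)
      · rw [pvLineFix_other q c hc h2,
          show acc ++ (q ++ [c] ++ ['\n']) = (acc ++ (q ++ [c])) ++ ['\n'] by simp]
        exact pvColonize_concat_none _ '\n' (by decide) (by simp)

-- pulling the initial buffer out of A's concatenating fold
theorem pvFoldl_shift (ls : List (List Char)) : ∀ p : List Char,
    ls.foldl (fun p line => p ++ pvLineFix line) p
      = p ++ ls.foldl (fun p line => p ++ pvLineFix line) [] := by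
  induction ls with
  | nil => simp
  | cons x xs ihx =>
    intro p
    rw [List.foldl_cons, List.foldl_cons, List.nil_append, ihx, ihx (pvLineFix x)]
    simp

-- main invariant: B's scan over the rest of the text equals A's rewrite of the remaining lines
theorem pvMain : ∀ (cs acc pre : List Char), pvColonize acc = none →
    pvFinal (List.foldl pvStep (acc ++ pre) cs)
      = acc ++ (pvSplit pre cs).foldl (fun p line => p ++ pvLineFix line) [] := by
  intro cs
  induction cs with
  | nil =>
    intro acc pre hacc
    rw [List.foldl_nil, pvFinal_append acc pre hacc]
    simp [pvSplit]
  | cons c rest ih =>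
    intro acc pre hacc
    by_cases hc : c = '\n'
    · subst hc
      rw [List.foldl_cons,
        show pvStep (acc ++ pre) '\n' = pvFinal (acc ++ pre) from if_pos rfl,
        pvFinal_append acc pre hacc]
      have hIH := ih (acc ++ pvLineFix pre) [] (pvColonize_lineFix_none acc pre)
      rw [List.append_nil] at hIH
      rw [hIH, show pvSplit pre ('\n' :: rest) = pre :: pvSplit [] rest from by simp [pvSplit],
        List.foldl_cons, pvFoldl_shift (pvSplit [] rest) ([] ++ pvLineFix pre)]
      simp
    · rw [List.foldl_cons,
        show pvStep (acc ++ pre) c = (acc ++ pre) ++ [c] from by simp [pvStep, hc],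
        show (acc ++ pre) ++ [c] = acc ++ (pre ++ [c]) by simp,
        show pvSplit pre (c :: rest) = pvSplit (pre ++ [c]) rest from by simp [pvSplit, hc]]
      exact ih acc (pre ++ [c]) hacc

-- ===== VERDICT (by name: the statement is the Claim_ definition above) =====
theorem replace_comma_before_newline_spec : Claim_equal_replace_comma_before_newline := by
  intro input_text _
  show replace_comma_before_newline input_text = replace_comma_before_newline_alt input_text
  unfold replace_comma_before_newline replace_comma_before_newline_alt
  rw [pvSplitOn_eq]
  have h := pvMain input_text.toList [] [] pvColonize_nil
  rw [List.nil_append] at h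
  rw [h, List.nil_append]
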